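-- pv_equiv track=rewrite | github.com/LINDBURG/Programmers | 동적계획법_서울에서 경산까지.py | solution
-- ===== SOURCE A (Python) =====
-- def solution(K, travel):
--     answer = [(0,0)]
--     for wt, wm, bt,bm in travel:
--         tmp = {}
--         for m,t in answer:
--             if t + wt <= K and ((m+wm) not in tmp or (tmp[m+wm] > t + wt)):
--                 tmp[m+wm] = t + wt
--             if t + bt <= K and ((m+bm) not in tmp or (tmp[m+bm] > t + bt)):
--                 tmp[m+bm] = t + bt
--         answer = list(tmp.items())
--
--     mx = answer[0][0]
--     for m,t in answer:
--         if m > mx: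
--             mx = m
--     return mx
-- ===== SOURCE B (Python) =====
-- def solution(K, travel):
--     # DP transposed relative to the mileage-keyed version: map total time -> best mileage.
--     best = {0: 0}
--     for wt, wm, bt, bm in travel:
--         nxt = {}
--         for t, m in best.items():
--             for dt, dm in ((wt, wm), (bt, bm)):
--                 nt = t + dt
--                 if nt <= K and (nt not in nxt or nxt[nt] < m + dm):
--                     nxt[nt] = m + dm
--         best = nxt
--     return max(best.values())
-- ===== Notes on version B (the rewrite author's own statement) =====
-- stated objective: alternative
-- what changed: Transposes the DP state: instead of a dict mileage->minimal time with 'keep the smaller time' updates and a hand-written final max loop over answer[0][0], B keeps a dict total-time->maximal mileage updated with 'keep the larger mileage' and finishes with max(best.values()).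
import Mathlib
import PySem

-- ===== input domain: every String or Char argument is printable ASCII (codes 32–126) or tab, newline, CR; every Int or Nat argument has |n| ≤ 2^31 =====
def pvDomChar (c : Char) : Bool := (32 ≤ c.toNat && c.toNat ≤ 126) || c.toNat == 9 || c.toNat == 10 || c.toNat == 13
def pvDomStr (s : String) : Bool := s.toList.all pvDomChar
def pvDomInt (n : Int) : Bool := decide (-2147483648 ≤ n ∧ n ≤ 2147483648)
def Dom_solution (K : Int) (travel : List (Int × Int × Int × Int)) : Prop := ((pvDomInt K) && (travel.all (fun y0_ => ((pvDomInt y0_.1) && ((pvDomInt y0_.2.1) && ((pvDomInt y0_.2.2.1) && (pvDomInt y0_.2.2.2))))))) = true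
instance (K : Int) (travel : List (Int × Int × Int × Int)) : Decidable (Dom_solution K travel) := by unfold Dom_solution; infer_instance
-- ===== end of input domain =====

-- B transposes the DP dict (total-time -> max mileage instead of mileage -> min time) and ends with max();
-- equal return values proved on Pre_; outside Pre_ both Pythons raise (A IndexError, B ValueError).


-- ===== PORT A =====
-- helper: Python's "if t' <= K and (k not in tmp or tmp[k] > t'): tmp[k] = t'"
def updA (K : Int) (tmp : PySem.Dict Int Int) (k t' : Int) : PySem.Dict Int Int :=
  if t' ≤ K then
    match tmp.get? k with
    | none => tmp.insert k t'
    | some old => if old > t' then tmp.insert k t' else tmp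
  else tmp

-- helper: body of A's outer loop (the inner 'for m,t in answer' building tmp, then list(tmp.items()))
def stepA (K : Int) (answer : List (Int × Int)) (seg : Int × Int × Int × Int) : List (Int × Int) :=
  match seg with
  | (wt, wm, bt, bm) =>
    (answer.foldl (fun tmp p => updA K (updA K tmp (p.1 + wm) (p.2 + wt)) (p.1 + bm) (p.2 + bt))
      PySem.Dict.empty).items

def solution (K : Int) (travel : List (Int × Int × Int × Int)) : Int :=
  let answer := travel.foldl (stepA K) [(0, 0)]
  -- answer[0][0]: IndexError on empty answer is excluded by Pre_solution (the .getD default is unreachable there)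
  let mx := ((PySem.List.pyGet? answer 0).getD (0, 0)).1
  answer.foldl (fun mx p => if p.1 > mx then p.1 else mx) mx

-- ===== PORT B =====
-- helper: Python's "if nt <= K and (nt not in nxt or nxt[nt] < nm): nxt[nt] = nm"
def updB (K : Int) (nxt : PySem.Dict Int Int) (nt nm : Int) : PySem.Dict Int Int :=
  if nt ≤ K then
    match nxt.get? nt with
    | none => nxt.insert nt nm
    | some old => if old < nm then nxt.insert nt nm else nxt
  else nxt

-- helper: body of B's outer loop ('for t,m in best.items(): for dt,dm in ((wt,wm),(bt,bm)): ...')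
def stepB (K : Int) (best : PySem.Dict Int Int) (seg : Int × Int × Int × Int) : PySem.Dict Int Int :=
  match seg with
  | (wt, wm, bt, bm) =>
    best.items.foldl (fun nxt p =>
        [(wt, wm), (bt, bm)].foldl (fun nxt q => updB K nxt (p.1 + q.1) (p.2 + q.2)) nxt)
      PySem.Dict.empty

def solution_alt (K : Int) (travel : List (Int × Int × Int × Int)) : Int :=
  let best := travel.foldl (stepB K) (PySem.Dict.empty.insert 0 0)
  -- max(best.values()): ValueError on an empty dict is excluded by Pre_solution (.getD default unreachable there)
  (PySem.List.max? best.values (fun x => x)).getD 0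

-- ===== PRECONDITION & SPEC =====
-- Pre_solution excludes exactly the inputs on which A raises IndexError (no route fits within K: even taking
-- the cheaper time of each segment, some prefix of total time already exceeds K); B raises ValueError there.
def Pre_solution (K : Int) (travel : List (Int × Int × Int × Int)) : Prop :=
  ∀ n < travel.length, ((travel.take (n + 1)).map (fun s => min s.1 s.2.2.1)).sum ≤ K
instance (K : Int) (travel : List (Int × Int × Int × Int)) : Decidable (Pre_solution K travel) := by
  unfold Pre_solution; infer_instance

def pvWitness_solution : Int × (List (Int × Int × Int × Int)) := (10, [(1, 5, 2, 3)])

def Spec_solution (K : Int) (travel : List (Int × Int × Int × Int)) (out : Int) : Prop := out = solution_alt K travel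
instance (K : Int) (travel : List (Int × Int × Int × Int)) (out : Int) : Decidable (Spec_solution K travel out) := by unfold Spec_solution; infer_instance

-- ===== CLAIM (what is proved, stated in full; the proofs are below) =====
def Claim_equal_solution : Prop := ∀ (K : Int) (travel : List (Int × Int × Int × Int)), Dom_solution K travel → Pre_solution K travel → Spec_solution K travel (solution K travel)

-- ===== LEMMAS AND PROOFS =====

-- The reference reachable-state list: all (mileage, time) pairs of selections whose every prefix time stays ≤ K.
def genS (K : Int) (seg : Int × Int × Int × Int) (p : Int × Int) : List (Int × Int) :=
  (if p.2 + seg.1 ≤ K then [(p.1 + seg.2.1, p.2 + seg.1)] else []) ++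
  (if p.2 + seg.2.2.1 ≤ K then [(p.1 + seg.2.2.2, p.2 + seg.2.2.1)] else [])

def stepS (K : Int) (S : List (Int × Int)) (seg : Int × Int × Int × Int) : List (Int × Int) :=
  S.flatMap (genS K seg)

-- A's list is a min-time representative system for S; B's dict items (time, mileage) a max-mileage one.
def InvA (ans S : List (Int × Int)) : Prop :=
  (∀ p ∈ ans, p ∈ S) ∧ (∀ p ∈ S, ∃ t', t' ≤ p.2 ∧ (p.1, t') ∈ ans)

def InvB (items S : List (Int × Int)) : Prop :=
  (∀ p ∈ items, (p.2, p.1) ∈ S) ∧ (∀ p ∈ S, ∃ m', p.1 ≤ m' ∧ (p.2, m') ∈ items)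

lemma mem_updA {K : Int} {tmp : PySem.Dict Int Int} {k t' : Int} {p : Int × Int}
    (h : p ∈ (updA K tmp k t').items) : (p = (k, t') ∧ t' ≤ K) ∨ p ∈ tmp.items := by
  unfold updA at h
  split_ifs at h with hK
  · rcases hg : tmp.get? k with _ | old <;> rw [hg] at h <;> simp only [] at h
    · rcases (PySem.Dict.mem_items_insert _ _ _ _).1 h with h' | h'
      · exact Or.inl ⟨h', hK⟩
      · exact Or.inr h'.1
    · split_ifs at h with hlt
      · rcases (PySem.Dict.mem_items_insert _ _ _ _).1 h with h' | h'
        · exact Or.inl ⟨h', hK⟩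
        · exact Or.inr h'.1
      · exact Or.inr h
  · exact Or.inr h

lemma updA_mono {K : Int} {tmp : PySem.Dict Int Int} (k t' : Int) {k' v : Int}
    (h : tmp.get? k' = some v) : ∃ v' ≤ v, (updA K tmp k t').get? k' = some v' := by
  unfold updA
  split_ifs with hK
  · by_cases hk : k' = k
    · subst hk
      rw [h]
      simp only []
      split_ifs with hlt
      · exact ⟨t', le_of_lt hlt, PySem.Dict.get?_insert_self _ _ _⟩
      · exact ⟨v, le_refl v, h⟩
    · rcases hg : tmp.get? k with _ | old <;> simp only []
      · exact ⟨v, le_refl v, by rw [PySem.Dict.get?_insert_of_ne _ _ hk]; exact h⟩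
      · split_ifs with hlt
        · exact ⟨v, le_refl v, by rw [PySem.Dict.get?_insert_of_ne _ _ hk]; exact h⟩
        · exact ⟨v, le_refl v, h⟩
  · exact ⟨v, le_refl v, h⟩

lemma updA_ensure {K : Int} (tmp : PySem.Dict Int Int) {k t' : Int} (h : t' ≤ K) :
    ∃ v ≤ t', (updA K tmp k t').get? k = some v := by
  unfold updA
  rw [if_pos h]
  rcases hg : tmp.get? k with _ | old <;> simp only []
  · exact ⟨t', le_refl _, PySem.Dict.get?_insert_self _ _ _⟩
  · split_ifs with hlt
    · exact ⟨t', le_refl _, PySem.Dict.get?_insert_self _ _ _⟩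
    · exact ⟨old, by omega, hg⟩

lemma mem_updB {K : Int} {nxt : PySem.Dict Int Int} {nt nm : Int} {p : Int × Int}
    (h : p ∈ (updB K nxt nt nm).items) : (p = (nt, nm) ∧ nt ≤ K) ∨ p ∈ nxt.items := by
  unfold updB at h
  split_ifs at h with hK
  · rcases hg : nxt.get? nt with _ | old <;> rw [hg] at h <;> simp only [] at h
    · rcases (PySem.Dict.mem_items_insert _ _ _ _).1 h with h' | h'
      · exact Or.inl ⟨h', hK⟩
      · exact Or.inr h'.1
    · split_ifs at h with hlt
      · rcases (PySem.Dict.mem_items_insert _ _ _ _).1 h with h' | h'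
        · exact Or.inl ⟨h', hK⟩
        · exact Or.inr h'.1
      · exact Or.inr h
  · exact Or.inr h

lemma updB_mono {K : Int} {nxt : PySem.Dict Int Int} (nt nm : Int) {k' v : Int}
    (h : nxt.get? k' = some v) : ∃ v', v ≤ v' ∧ (updB K nxt nt nm).get? k' = some v' := by
  unfold updB
  split_ifs with hK
  · by_cases hk : k' = nt
    · subst hk
      rw [h]
      simp only []
      split_ifs with hlt
      · exact ⟨nm, le_of_lt hlt, PySem.Dict.get?_insert_self _ _ _⟩
      · exact ⟨v, le_refl v, h⟩
    · rcases hg : nxt.get? nt with _ | old <;> simp only []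
      · exact ⟨v, le_refl v, by rw [PySem.Dict.get?_insert_of_ne _ _ hk]; exact h⟩
      · split_ifs with hlt
        · exact ⟨v, le_refl v, by rw [PySem.Dict.get?_insert_of_ne _ _ hk]; exact h⟩
        · exact ⟨v, le_refl v, h⟩
  · exact ⟨v, le_refl v, h⟩

lemma updB_ensure {K : Int} (nxt : PySem.Dict Int Int) {nt nm : Int} (h : nt ≤ K) :
    ∃ v, nm ≤ v ∧ (updB K nxt nt nm).get? nt = some v := by
  unfold updB
  rw [if_pos h]
  rcases hg : nxt.get? nt with _ | old <;> simp only []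
  · exact ⟨nm, le_refl _, PySem.Dict.get?_insert_self _ _ _⟩
  · split_ifs with hlt
    · exact ⟨nm, le_refl _, PySem.Dict.get?_insert_self _ _ _⟩
    · exact ⟨old, by omega, hg⟩

lemma mem_genS {K : Int} {seg : Int × Int × Int × Int} {p0 p : Int × Int} :
    p ∈ genS K seg p0 ↔
      (p = (p0.1 + seg.2.1, p0.2 + seg.1) ∧ p0.2 + seg.1 ≤ K) ∨
      (p = (p0.1 + seg.2.2.2, p0.2 + seg.2.2.1) ∧ p0.2 + seg.2.2.1 ≤ K) := by
  unfold genS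
  split_ifs with h1 h2 <;> simp_all

lemma foldA_mem {K wt wm bt bm : Int} :
    ∀ (l : List (Int × Int)) (tmp : PySem.Dict Int Int) (p : Int × Int),
      p ∈ ((l.foldl (fun tmp p => updA K (updA K tmp (p.1 + wm) (p.2 + wt)) (p.1 + bm) (p.2 + bt)) tmp).items) →
      p ∈ tmp.items ∨ ∃ p0 ∈ l, p ∈ genS K (wt, wm, bt, bm) p0 := by
  intro l
  induction l with
  | nil => exact fun tmp p h => Or.inl h
  | cons q l ih =>
    intro tmp p h
    rcases ih _ p h with h' | ⟨p0, hp0, hgen⟩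
    · rcases mem_updA h' with ⟨he, hK⟩ | h'' 
      · exact Or.inr ⟨q, List.mem_cons_self .., mem_genS.2 (Or.inr ⟨he, hK⟩)⟩
      · rcases mem_updA h'' with ⟨he, hK⟩ | h3
        · exact Or.inr ⟨q, List.mem_cons_self .., mem_genS.2 (Or.inl ⟨he, hK⟩)⟩
        · exact Or.inl h3
    · exact Or.inr ⟨p0, List.mem_cons_of_mem _ hp0, hgen⟩

lemma foldA_mono {K wt wm bt bm : Int} :
    ∀ (l : List (Int × Int)) (tmp : PySem.Dict Int Int) (k v : Int),
      tmp.get? k = some v →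
      ∃ v' ≤ v, (l.foldl (fun tmp p => updA K (updA K tmp (p.1 + wm) (p.2 + wt)) (p.1 + bm) (p.2 + bt)) tmp).get? k = some v' := by
  intro l
  induction l with
  | nil => exact fun tmp k v h => ⟨v, le_refl v, h⟩
  | cons q l ih =>
    intro tmp k v h
    obtain ⟨v1, hv1, h1⟩ := updA_mono (K := K) (q.1 + wm) (q.2 + wt) h
    obtain ⟨v2, hv2, h2⟩ := updA_mono (K := K) (q.1 + bm) (q.2 + bt) h1
    obtain ⟨v3, hv3, h3⟩ := ih _ k v2 h2
    exact ⟨v3, by omega, h3⟩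

lemma foldA_ensure {K wt wm bt bm : Int} :
    ∀ (l : List (Int × Int)) (tmp : PySem.Dict Int Int) (p0 : Int × Int), p0 ∈ l →
      ∀ p ∈ genS K (wt, wm, bt, bm) p0,
      ∃ v ≤ p.2, (l.foldl (fun tmp p => updA K (updA K tmp (p.1 + wm) (p.2 + wt)) (p.1 + bm) (p.2 + bt)) tmp).get? p.1 = some v := by
  intro l
  induction l with
  | nil => intro _ _ h; cases h
  | cons q l ih =>
    intro tmp p0 hp0 p hp
    rcases List.mem_cons.1 hp0 with rfl | hp0'
    · rcases mem_genS.1 hp with ⟨rfl, hK⟩ | ⟨rfl, hK⟩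
      · obtain ⟨v1, hv1, h1⟩ := updA_ensure (K := K) tmp (k := p0.1 + wm) hK
        obtain ⟨v2, hv2, h2⟩ := updA_mono (K := K) (p0.1 + bm) (p0.2 + bt) h1
        obtain ⟨v3, hv3, h3⟩ := foldA_mono (wt := wt) (wm := wm) (bt := bt) (bm := bm) l _ _ _ h2
        exact ⟨v3, by dsimp only at *; omega, h3⟩
      · obtain ⟨v1, hv1, h1⟩ := updA_ensure (K := K) (updA K tmp (p0.1 + wm) (p0.2 + wt)) (k := p0.1 + bm) hK
        obtain ⟨v3, hv3, h3⟩ := foldA_mono (wt := wt) (wm := wm) (bt := bt) (bm := bm) l _ _ _ h1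
        exact ⟨v3, by dsimp only at *; omega, h3⟩
    · exact ih _ p0 hp0' p hp

lemma stepA_inv {K : Int} {ans S : List (Int × Int)} (seg : Int × Int × Int × Int)
    (h : InvA ans S) : InvA (stepA K ans seg) (stepS K S seg) := by
  obtain ⟨wt, wm, bt, bm⟩ := seg
  constructor
  · intro p hp
    rcases foldA_mem ans PySem.Dict.empty p hp with h' | ⟨p0, hp0, hgen⟩
    · simp [PySem.Dict.empty] at h'
    · exact List.mem_flatMap.2 ⟨p0, h.1 p0 hp0, hgen⟩
  · intro p hpS
    obtain ⟨p0, hp0S, hgen⟩ := List.mem_flatMap.1 hpS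
    obtain ⟨t0, ht0, hmem⟩ := h.2 p0 hp0S
    rcases mem_genS.1 hgen with ⟨rfl, hK⟩ | ⟨rfl, hK⟩
    · have hg : ((p0.1 + wm, t0 + wt) : Int × Int) ∈ genS K (wt, wm, bt, bm) (p0.1, t0) :=
        mem_genS.2 (Or.inl ⟨rfl, by omega⟩)
      obtain ⟨v, hv, hget⟩ := foldA_ensure ans PySem.Dict.empty (p0.1, t0) hmem _ hg
      exact ⟨v, by simp only [] at hv ⊢; omega, PySem.Dict.mem_items_of_get?_eq_some _ hget⟩
    · have hg : ((p0.1 + bm, t0 + bt) : Int × Int) ∈ genS K (wt, wm, bt, bm) (p0.1, t0) :=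
        mem_genS.2 (Or.inr ⟨rfl, by omega⟩)
      obtain ⟨v, hv, hget⟩ := foldA_ensure ans PySem.Dict.empty (p0.1, t0) hmem _ hg
      exact ⟨v, by simp only [] at hv ⊢; omega, PySem.Dict.mem_items_of_get?_eq_some _ hget⟩

lemma foldB_mem {K wt wm bt bm : Int} :
    ∀ (l : List (Int × Int)) (nxt : PySem.Dict Int Int) (p : Int × Int),
      p ∈ ((l.foldl (fun nxt p => updB K (updB K nxt (p.1 + wt) (p.2 + wm)) (p.1 + bt) (p.2 + bm)) nxt).items) →
      p ∈ nxt.items ∨ ∃ p0 ∈ l, ((p.2, p.1) : Int × Int) ∈ genS K (wt, wm, bt, bm) (p0.2, p0.1) := by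
  intro l
  induction l with
  | nil => exact fun nxt p h => Or.inl h
  | cons q l ih =>
    intro nxt p h
    rcases ih _ p h with h' | ⟨p0, hp0, hgen⟩
    · rcases mem_updB h' with ⟨he, hK⟩ | h''
      · refine Or.inr ⟨q, List.mem_cons_self .., mem_genS.2 (Or.inr ⟨?_, by simpa using hK⟩)⟩
        simp [he]
      · rcases mem_updB h'' with ⟨he, hK⟩ | h3
        · refine Or.inr ⟨q, List.mem_cons_self .., mem_genS.2 (Or.inl ⟨?_, by simpa using hK⟩)⟩
          simp [he]
        · exact Or.inl h3
    · exact Or.inr ⟨p0, List.mem_cons_of_mem _ hp0, hgen⟩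

lemma foldB_mono {K wt wm bt bm : Int} :
    ∀ (l : List (Int × Int)) (nxt : PySem.Dict Int Int) (k v : Int),
      nxt.get? k = some v →
      ∃ v', v ≤ v' ∧ (l.foldl (fun nxt p => updB K (updB K nxt (p.1 + wt) (p.2 + wm)) (p.1 + bt) (p.2 + bm)) nxt).get? k = some v' := by
  intro l
  induction l with
  | nil => exact fun nxt k v h => ⟨v, le_refl v, h⟩
  | cons q l ih =>
    intro nxt k v h
    obtain ⟨v1, hv1, h1⟩ := updB_mono (K := K) (q.1 + wt) (q.2 + wm) h
    obtain ⟨v2, hv2, h2⟩ := updB_mono (K := K) (q.1 + bt) (q.2 + bm) h1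
    obtain ⟨v3, hv3, h3⟩ := ih _ k v2 h2
    exact ⟨v3, by omega, h3⟩

lemma foldB_ensure {K wt wm bt bm : Int} :
    ∀ (l : List (Int × Int)) (nxt : PySem.Dict Int Int) (p0 : Int × Int), p0 ∈ l →
      ∀ p ∈ genS K (wt, wm, bt, bm) (p0.2, p0.1),
      ∃ v, p.1 ≤ v ∧ (l.foldl (fun nxt p => updB K (updB K nxt (p.1 + wt) (p.2 + wm)) (p.1 + bt) (p.2 + bm)) nxt).get? p.2 = some v := by
  intro l
  induction l with
  | nil => intro _ _ h; cases h
  | cons q l ih =>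
    intro nxt p0 hp0 p hp
    rcases List.mem_cons.1 hp0 with rfl | hp0'
    · rcases mem_genS.1 hp with ⟨rfl, hK⟩ | ⟨rfl, hK⟩
      · obtain ⟨v1, hv1, h1⟩ := updB_ensure (K := K) nxt (nt := p0.1 + wt) (nm := p0.2 + wm) (by simpa using hK)
        obtain ⟨v2, hv2, h2⟩ := updB_mono (K := K) (p0.1 + bt) (p0.2 + bm) h1
        obtain ⟨v3, hv3, h3⟩ := foldB_mono (wt := wt) (wm := wm) (bt := bt) (bm := bm) l _ _ _ h2
        exact ⟨v3, by dsimp only at *; omega, h3⟩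
      · obtain ⟨v1, hv1, h1⟩ := updB_ensure (K := K) (updB K nxt (p0.1 + wt) (p0.2 + wm)) (nt := p0.1 + bt) (nm := p0.2 + bm) (by simpa using hK)
        obtain ⟨v3, hv3, h3⟩ := foldB_mono (wt := wt) (wm := wm) (bt := bt) (bm := bm) l _ _ _ h1
        exact ⟨v3, by dsimp only at *; omega, h3⟩
    · exact ih _ p0 hp0' p hp

lemma stepB_inv {K : Int} {best : PySem.Dict Int Int} {S : List (Int × Int)} (seg : Int × Int × Int × Int)
    (h : InvB best.items S) : InvB (stepB K best seg).items (stepS K S seg) := by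
  obtain ⟨wt, wm, bt, bm⟩ := seg
  constructor
  · intro p hp
    rcases foldB_mem best.items PySem.Dict.empty p hp with h' | ⟨p0, hp0, hgen⟩
    · simp [PySem.Dict.empty] at h'
    · exact List.mem_flatMap.2 ⟨(p0.2, p0.1), h.1 p0 hp0, hgen⟩
  · intro p hpS
    obtain ⟨p0, hp0S, hgen⟩ := List.mem_flatMap.1 hpS
    obtain ⟨m0, hm0, hmem⟩ := h.2 p0 hp0S
    rcases mem_genS.1 hgen with ⟨rfl, hK⟩ | ⟨rfl, hK⟩
    · have hg : ((m0 + wm, p0.2 + wt) : Int × Int) ∈ genS K (wt, wm, bt, bm) ((p0.2, m0).2, (p0.2, m0).1) :=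
        mem_genS.2 (Or.inl ⟨rfl, by simpa using hK⟩)
      obtain ⟨v, hv, hget⟩ := foldB_ensure best.items PySem.Dict.empty (p0.2, m0) hmem _ hg
      exact ⟨v, by simp only [] at hv ⊢; omega, PySem.Dict.mem_items_of_get?_eq_some _ hget⟩
    · have hg : ((m0 + bm, p0.2 + bt) : Int × Int) ∈ genS K (wt, wm, bt, bm) ((p0.2, m0).2, (p0.2, m0).1) :=
        mem_genS.2 (Or.inr ⟨rfl, by simpa using hK⟩)
      obtain ⟨v, hv, hget⟩ := foldB_ensure best.items PySem.Dict.empty (p0.2, m0) hmem _ hg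
      exact ⟨v, by simp only [] at hv ⊢; omega, PySem.Dict.mem_items_of_get?_eq_some _ hget⟩

lemma foldA_inv {K : Int} (travel : List (Int × Int × Int × Int)) {ans S : List (Int × Int)}
    (h : InvA ans S) : InvA (travel.foldl (stepA K) ans) (travel.foldl (stepS K) S) := by
  induction travel generalizing ans S with
  | nil => exact h
  | cons seg rest ih => exact ih (stepA_inv seg h)

lemma foldB_inv {K : Int} (travel : List (Int × Int × Int × Int)) {best : PySem.Dict Int Int}
    {S : List (Int × Int)} (h : InvB best.items S) :
    InvB (travel.foldl (stepB K) best).items (travel.foldl (stepS K) S) := by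
  induction travel generalizing best S with
  | nil => exact h
  | cons seg rest ih => exact ih (stepB_inv seg h)

-- mutual domination gives equal max? (key = identity)
lemma max?_dom {l1 l2 : List Int} (h1 : ∀ x ∈ l1, ∃ y ∈ l2, x ≤ y) (h2 : ∀ x ∈ l2, ∃ y ∈ l1, x ≤ y) :
    PySem.List.max? l1 (fun x => x) = PySem.List.max? l2 (fun x => x) := by
  rcases h1' : PySem.List.max? l1 (fun x => x) with _ | a <;>
    rcases h2' : PySem.List.max? l2 (fun x => x) with _ | b
  · rfl
  · obtain ⟨y, hy, _⟩ := h2 b (PySem.List.max?_mem h2')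
    rw [(PySem.List.max?_eq_none_iff _ _).1 h1'] at hy
    cases hy
  · obtain ⟨y, hy, _⟩ := h1 a (PySem.List.max?_mem h1')
    rw [(PySem.List.max?_eq_none_iff _ _).1 h2'] at hy
    cases hy
  · obtain ⟨y, hy, hay⟩ := h1 a (PySem.List.max?_mem h1')
    obtain ⟨z, hz, hbz⟩ := h2 b (PySem.List.max?_mem h2')
    have hyb := PySem.List.max?_isMax h2' y hy
    have hza := PySem.List.max?_isMax h1' z hz
    simp only [] at hyb hza
    have : a = b := by omega
    rw [this]

lemma foldl_if_max (l : List (Int × Int)) (a : Int) :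
    l.foldl (fun mx p => if p.1 > mx then p.1 else mx) a = (l.map (·.1)).foldl max a := by
  induction l generalizing a with
  | nil => rfl
  | cons p l ih =>
    simp only [List.foldl_cons, List.map_cons]
    rw [ih]
    congr 1
    split_ifs <;> omega

-- A's epilogue computes exactly (max? of first components).getD 0
lemma solA_max (ans : List (Int × Int)) :
    ans.foldl (fun mx p => if p.1 > mx then p.1 else mx) (((PySem.List.pyGet? ans 0).getD (0, 0)).1)
      = (PySem.List.max? (ans.map (·.1)) (fun x => x)).getD 0 := by
  cases ans with
  | nil => simp [PySem.List.pyGet?, PySem.List.max?]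
  | cons p l =>
    rw [PySem.List.pyGet?_zero_cons]
    simp only [Option.getD_some, List.map_cons]
    rw [PySem.List.max?_id_cons]
    simp only [Option.getD_some, List.foldl_cons]
    rw [foldl_if_max]
    congr 1
    split_ifs <;> omega

-- ===== VERDICT (by name: the statement is the Claim_ definition above) =====
theorem solution_spec : Claim_equal_solution := by
  intro K travel _ _
  unfold Spec_solution solution solution_alt
  have hA : InvA (travel.foldl (stepA K) [(0, 0)]) (travel.foldl (stepS K) [(0, 0)]) := by
    refine foldA_inv travel ⟨fun p hp => hp, fun p hp => ?_⟩
    simp only [List.mem_singleton] at hp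
    exact ⟨0, by simp [hp], by simp [hp]⟩
  have hB : InvB (travel.foldl (stepB K) (PySem.Dict.empty.insert 0 0)).items
      (travel.foldl (stepS K) [(0, 0)]) := by
    refine foldB_inv travel ⟨fun p hp => ?_, fun p hp => ?_⟩
    · have : p = ((0 : Int), (0 : Int)) := by
        have he : (PySem.Dict.empty.insert (0 : Int) (0 : Int)).items = [(0, 0)] := by decide
        rw [he] at hp; simpa using hp
      simp [this]
    · simp only [List.mem_singleton] at hp
      refine ⟨0, by simp [hp], ?_⟩
      have he : (PySem.Dict.empty.insert (0 : Int) (0 : Int)).items = [(0, 0)] := by decide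
      rw [he]; simp [hp]
  set ansA := travel.foldl (stepA K) [((0 : Int), (0 : Int))] with hansA
  set dB := travel.foldl (stepB K) (PySem.Dict.empty.insert 0 0) with hdB
  set Sf := travel.foldl (stepS K) [((0 : Int), (0 : Int))] with hSf
  rw [solA_max]
  show (PySem.List.max? (ansA.map (·.1)) (fun x => x)).getD 0
      = (PySem.List.max? (dB.items.map (·.2)) (fun x => x)).getD 0
  congr 1
  apply max?_dom
  · intro x hx
    obtain ⟨p, hp, rfl⟩ := List.mem_map.1 hx
    obtain ⟨m', hm', hmem⟩ := hB.2 p (hA.1 p hp)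
    exact ⟨m', List.mem_map.2 ⟨(p.2, m'), by simpa using hmem, rfl⟩, hm'⟩
  · intro x hx
    obtain ⟨p, hp, rfl⟩ := List.mem_map.1 hx
    obtain ⟨t', ht', hmem⟩ := hA.2 (p.2, p.1) (hB.1 p hp)
    exact ⟨p.2, List.mem_map.2 ⟨(p.2, t'), by simpa using hmem, rfl⟩, le_refl _⟩
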